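-- pv_equiv track=rewrite | github.com/vladislava1909/test_project | tasks.py | get_longest_english_word
-- ===== SOURCE A (Python) =====
-- def is_eng_word(str):
--     eng = 'ABCDEFGHIJKLMNOPQRSTUVWXYZzyxwvutsrqponmlkjihgfedcba'
--     for i in str:
--         if i not in eng:
--             return False
--     return True
--
-- def get_longest_english_word(dict_words):
--     long_eng_word = ""
--     count_char_in_eng_word = 0
--     for i in dict_words.keys():
--         if len(i) > count_char_in_eng_word and is_eng_word(i):
--             count_char_in_eng_word = len(i)
--             long_eng_word = i
--     return long_eng_word
-- ===== SOURCE B (Python) =====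
-- def get_longest_english_word(dict_words):
--     eng = 'ABCDEFGHIJKLMNOPQRSTUVWXYZzyxwvutsrqponmlkjihgfedcba'
--     for word in sorted(dict_words, key=len, reverse=True):
--         if all(c in eng for c in word):
--             return word
--     return ""
-- ===== Notes on version B (the rewrite author's own statement) =====
-- stated objective: alternative
-- what changed: A does one pass keeping a running first-wins maximum with a separate length counter; B stably sorts the keys by length descending and returns the first all-letters key, '' if none.
import Mathlib
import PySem

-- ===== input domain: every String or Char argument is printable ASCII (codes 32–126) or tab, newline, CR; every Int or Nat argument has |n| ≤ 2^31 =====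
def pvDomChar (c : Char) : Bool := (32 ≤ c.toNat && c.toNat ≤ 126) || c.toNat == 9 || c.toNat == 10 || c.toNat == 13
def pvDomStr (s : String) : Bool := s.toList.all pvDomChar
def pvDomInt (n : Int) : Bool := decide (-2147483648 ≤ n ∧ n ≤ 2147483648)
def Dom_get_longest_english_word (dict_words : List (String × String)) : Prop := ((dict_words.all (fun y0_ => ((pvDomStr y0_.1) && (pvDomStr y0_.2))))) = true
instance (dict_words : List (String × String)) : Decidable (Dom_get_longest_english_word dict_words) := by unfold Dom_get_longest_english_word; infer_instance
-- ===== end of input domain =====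

-- B replaces A's single-pass running-maximum (with its separate length counter) by a stable
-- length-descending sort followed by a first-match scan; same results, alternative algorithm (not faster).

-- ===== PORT A =====
-- 'i not in eng' for a 1-char string i is character membership in eng
def is_eng_word (s : String) : Bool :=
  s.toList.all (fun c => "ABCDEFGHIJKLMNOPQRSTUVWXYZzyxwvutsrqponmlkjihgfedcba".toList.contains c)

def get_longest_english_word (dict_words : List (String × String)) : String :=
  ((dict_words.map Prod.fst).foldl
    (fun st i => if decide (st.2 < PySem.Str.len i) && is_eng_word i then (i, PySem.Str.len i) else st)
    ("", (0 : Int))).1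

-- ===== PORT B =====
def is_english_alt (word : String) : Bool :=
  word.toList.all (fun c => "ABCDEFGHIJKLMNOPQRSTUVWXYZzyxwvutsrqponmlkjihgfedcba".toList.contains c)

def get_longest_english_word_alt (dict_words : List (String × String)) : String :=
  ((PySem.List.sorted (dict_words.map Prod.fst) (fun w => PySem.Str.len w) true).find?
    is_english_alt).getD ""

-- ===== PRECONDITION & SPEC =====
def Spec_get_longest_english_word (dict_words : List (String × String)) (out : String) : Prop := out = get_longest_english_word_alt dict_words
instance (dict_words : List (String × String)) (out : String) : Decidable (Spec_get_longest_english_word dict_words out) := by unfold Spec_get_longest_english_word; infer_instance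

-- ===== CLAIM (what is proved, stated in full; the proofs are below) =====
def Claim_equal_get_longest_english_word : Prop := ∀ (dict_words : List (String × String)), Dom_get_longest_english_word dict_words → Spec_get_longest_english_word dict_words (get_longest_english_word dict_words)

-- ===== LEMMAS AND PROOFS =====

-- A's fold step, with the length counter eliminated (invariant: counter = length of the best word)
def pvStep (acc x : String) : String :=
  if decide (PySem.Str.len acc < PySem.Str.len x) && is_eng_word x then x else acc

-- first valid word of a list, '' if none
def pvFv (l : List String) : String := (l.find? is_eng_word).getD ""

-- the insertion comparator of sorted(., key=len, reverse=True)
def pvBefore (a b : String) : Bool := decide (PySem.Str.len b < PySem.Str.len a)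

-- length-descending order
def pvDesc (a b : String) : Prop := PySem.Str.len b ≤ PySem.Str.len a

lemma pv_len_nonneg (s : String) : 0 ≤ PySem.Str.len s := by
  simp [PySem.Str.len_eq]

lemma pv_len_le_zero (s : String) (h : PySem.Str.len s ≤ 0) : s = "" := by
  rw [PySem.Str.len_eq] at h
  have h2 : s.toList.length = 0 := by omega
  exact String.toList_eq_nil_iff.mp (List.length_eq_zero_iff.mp h2)

lemma pv_fv_nil : pvFv [] = "" := rfl

lemma pv_fv_cons_pos (y : String) (t : List String) (h : is_eng_word y = true) :
    pvFv (y :: t) = y := by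
  simp only [pvFv, List.find?_cons_of_pos h, Option.getD_some]

lemma pv_fv_cons_neg (y : String) (t : List String) (h : ¬ is_eng_word y = true) :
    pvFv (y :: t) = pvFv t := by
  simp only [pvFv, List.find?_cons_of_neg h]

lemma pv_fv_cases (l : List String) :
    pvFv l = "" ∨ (pvFv l ∈ l ∧ is_eng_word (pvFv l) = true) := by
  unfold pvFv
  cases h : l.find? is_eng_word with
  | none => exact Or.inl rfl
  | some w => exact Or.inr ⟨List.mem_of_find?_eq_some h, List.find?_some h⟩

lemma pv_step_pos (acc x : String) (he : is_eng_word x = true)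
    (hlt : PySem.Str.len acc < PySem.Str.len x) : pvStep acc x = x := by
  unfold pvStep
  rw [decide_eq_true hlt, he]
  rfl

lemma pv_step_small (acc x : String) (h : ¬ PySem.Str.len acc < PySem.Str.len x) :
    pvStep acc x = acc := by
  unfold pvStep
  rw [decide_eq_false h]
  rfl

lemma pv_step_noneng (acc x : String) (h : ¬ is_eng_word x = true) :
    pvStep acc x = acc := by
  unfold pvStep
  rw [eq_false_of_ne_true h]
  simp

lemma pv_insertBy_pairwise (x : String) (l : List String) (h : l.Pairwise pvDesc) :
    (PySem.List.insertBy pvBefore x l).Pairwise pvDesc := by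
  induction l with
  | nil => simp [PySem.List.insertBy, pvDesc]
  | cons y t ih =>
    rcases List.pairwise_cons.mp h with ⟨h1, h2⟩
    rw [show PySem.List.insertBy pvBefore x (y :: t)
        = if pvBefore x y then x :: y :: t else y :: PySem.List.insertBy pvBefore x t from rfl]
    by_cases hb : pvBefore x y = true
    · have hlt : PySem.Str.len y < PySem.Str.len x := of_decide_eq_true hb
      rw [if_pos hb]
      refine List.pairwise_cons.mpr ⟨?_, h⟩
      intro z hz
      rcases List.mem_cons.mp hz with rfl | hz
      · exact le_of_lt hlt
      · exact le_trans (h1 z hz) (le_of_lt hlt)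
    · have hle : PySem.Str.len x ≤ PySem.Str.len y :=
        not_lt.mp (of_decide_eq_false (eq_false_of_ne_true hb))
      rw [if_neg hb]
      refine List.pairwise_cons.mpr ⟨?_, ih h2⟩
      intro z hz
      rcases (PySem.List.mem_insertBy pvBefore x z t).mp hz with rfl | hz
      · exact hle
      · exact h1 z hz

lemma pv_key_step (l : List String) (h : l.Pairwise pvDesc) (x : String) :
    pvFv (PySem.List.insertBy pvBefore x l) = pvStep (pvFv l) x := by
  induction l with
  | nil =>
    rw [show PySem.List.insertBy pvBefore x [] = [x] from rfl, pv_fv_nil]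
    by_cases he : is_eng_word x = true
    · by_cases hl : 0 < PySem.Str.len x
      · rw [pv_fv_cons_pos x [] he, pv_step_pos "" x he (by
          rw [show PySem.Str.len "" = 0 from rfl]; exact hl)]
      · have hx : x = "" := pv_len_le_zero x (not_lt.mp hl)
        subst hx
        rw [pv_fv_cons_pos "" [] he, pv_step_small "" "" (lt_irrefl _)]
    · rw [pv_fv_cons_neg x [] he, pv_fv_nil, pv_step_noneng "" x he]
  | cons y t ih =>
    rcases List.pairwise_cons.mp h with ⟨h1, h2⟩
    rw [show PySem.List.insertBy pvBefore x (y :: t)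
        = if pvBefore x y then x :: y :: t else y :: PySem.List.insertBy pvBefore x t from rfl]
    by_cases hb : pvBefore x y = true
    · have hlt : PySem.Str.len y < PySem.Str.len x := of_decide_eq_true hb
      rw [if_pos hb]
      by_cases he : is_eng_word x = true
      · have hfv : PySem.Str.len (pvFv (y :: t)) < PySem.Str.len x := by
          rcases pv_fv_cases (y :: t) with hf | ⟨hmem, _⟩
          · rw [hf, show PySem.Str.len "" = 0 from rfl]
            have := pv_len_nonneg y
            omega
          · rcases List.mem_cons.mp hmem with hf | hf
            · rw [hf]; exact hlt
            · exact lt_of_le_of_lt (h1 _ hf) hlt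
        rw [pv_fv_cons_pos x (y :: t) he, pv_step_pos (pvFv (y :: t)) x he hfv]
      · rw [pv_fv_cons_neg x (y :: t) he, pv_step_noneng (pvFv (y :: t)) x he]
    · have hle : PySem.Str.len x ≤ PySem.Str.len y :=
        not_lt.mp (of_decide_eq_false (eq_false_of_ne_true hb))
      rw [if_neg hb]
      by_cases hey : is_eng_word y = true
      · rw [pv_fv_cons_pos y (PySem.List.insertBy pvBefore x t) hey, pv_fv_cons_pos y t hey,
          pv_step_small y x (not_lt_of_ge hle)]
      · rw [pv_fv_cons_neg y (PySem.List.insertBy pvBefore x t) hey, ih h2,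
          pv_fv_cons_neg y t hey]

lemma pv_key_fold (ks : List String) : ∀ (S : List String), S.Pairwise pvDesc →
    pvFv (ks.foldl (fun acc x => PySem.List.insertBy pvBefore x acc) S) = ks.foldl pvStep (pvFv S) := by
  induction ks with
  | nil => intro S _; rfl
  | cons k ks ih =>
    intro S hS
    simp only [List.foldl_cons]
    rw [ih _ (pv_insertBy_pairwise k S hS), pv_key_step S hS k]

lemma pv_A_fold (ks : List String) : ∀ (w : String),
    ks.foldl (fun st i => if decide (st.2 < PySem.Str.len i) && is_eng_word i then (i, PySem.Str.len i) else st)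
      (w, PySem.Str.len w)
    = (ks.foldl pvStep w, PySem.Str.len (ks.foldl pvStep w)) := by
  induction ks with
  | nil => intro w; rfl
  | cons k ks ih =>
    intro w
    simp only [List.foldl_cons]
    by_cases h : (decide (PySem.Str.len w < PySem.Str.len k) && is_eng_word k) = true
    · rw [show ((if decide ((w, PySem.Str.len w).2 < PySem.Str.len k) && is_eng_word k
          then (k, PySem.Str.len k) else (w, PySem.Str.len w)) : String × Int)
          = (k, PySem.Str.len k) from if_pos h,
        show pvStep w k = k by unfold pvStep; exact if_pos h]
      exact ih k
    · rw [show ((if decide ((w, PySem.Str.len w).2 < PySem.Str.len k) && is_eng_word k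
          then (k, PySem.Str.len k) else (w, PySem.Str.len w)) : String × Int)
          = (w, PySem.Str.len w) from if_neg h,
        show pvStep w k = w by unfold pvStep; exact if_neg h]
      exact ih w

-- ===== VERDICT (by name: the statement is the Claim_ definition above) =====
theorem get_longest_english_word_spec : Claim_equal_get_longest_english_word := by
  intro dict_words _
  unfold Spec_get_longest_english_word get_longest_english_word get_longest_english_word_alt
  rw [PySem.List.sorted_rev_eq_foldl_insertBy]
  have hA := pv_A_fold (dict_words.map Prod.fst) ""
  rw [show PySem.Str.len "" = 0 from rfl] at hA
  rw [hA]
  have hB := pv_key_fold (dict_words.map Prod.fst) [] (List.Pairwise.nil)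
  rw [pv_fv_nil] at hB
  exact hB.symm
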